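-- pv_equiv track=rewrite | github.com/mahesh989/cv-new | cv-magic-app/backend/app/services/ats/components/consistency_validator.py | _is_role_level_inconsistent
-- ===== SOURCE A (Python) =====
-- def _is_role_level_inconsistent(exp_level: str, seniority_scope: str) -> bool:
--     """Check if role levels are inconsistent."""
--     # Define level mappings
--     level_mappings = {
--         "Entry-Level": ["Entry-Level", "Junior"],
--         "Mid-Level": ["Mid-Level", "Mid-Senior", "Senior Individual Contributor"],
--         "Senior": ["Senior", "Senior Individual Contributor", "Lead"],
--         "Executive": ["Executive", "Director", "VP"]
--     }
--
--     # Check if levels are compatible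
--     for level, scopes in level_mappings.items():
--         if exp_level in scopes and seniority_scope in scopes:
--             return False
--
--     return True
-- ===== SOURCE B (Python) =====
-- # B: precompute a scope -> compatible-scopes adjacency dict once from the fixed
-- # mapping, then answer each query with a single lookup (idiomatic; no per-call scan).
--
-- _LEVEL_MAPPINGS = {
--     "Entry-Level": ["Entry-Level", "Junior"],
--     "Mid-Level": ["Mid-Level", "Mid-Senior", "Senior Individual Contributor"],
--     "Senior": ["Senior", "Senior Individual Contributor", "Lead"],
--     "Executive": ["Executive", "Director", "VP"],
-- }
--
-- _COMPAT = {}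
-- for _scopes in _LEVEL_MAPPINGS.values():
--     for _sc in _scopes:
--         _COMPAT.setdefault(_sc, set()).update(_scopes)
--
--
-- def _is_role_level_inconsistent(exp_level: str, seniority_scope: str) -> bool:
--     """Check if role levels are inconsistent."""
--     return seniority_scope not in _COMPAT.get(exp_level, set())
-- ===== Notes on version B (the rewrite author's own statement) =====
-- stated objective: idiomatic
-- what changed: B precomputes once a scope->compatible-scopes adjacency dict (union of all groups sharing each scope) from the fixed mapping, so each call is a single dict lookup plus set membership instead of A's per-call scan over all groups.
import Mathlib
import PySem

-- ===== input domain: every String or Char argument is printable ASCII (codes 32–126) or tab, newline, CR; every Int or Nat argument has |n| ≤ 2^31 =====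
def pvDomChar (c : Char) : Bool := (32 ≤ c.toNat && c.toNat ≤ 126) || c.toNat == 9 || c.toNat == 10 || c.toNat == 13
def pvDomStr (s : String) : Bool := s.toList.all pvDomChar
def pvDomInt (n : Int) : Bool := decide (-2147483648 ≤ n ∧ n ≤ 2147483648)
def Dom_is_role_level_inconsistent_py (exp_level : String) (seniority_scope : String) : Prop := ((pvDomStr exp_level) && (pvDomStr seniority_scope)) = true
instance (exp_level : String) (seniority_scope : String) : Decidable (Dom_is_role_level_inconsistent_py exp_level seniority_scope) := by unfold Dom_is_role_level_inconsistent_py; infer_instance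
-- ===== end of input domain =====

-- B precomputes a scope→compatible-scopes adjacency dict from the fixed mapping and
-- answers each query with one lookup; equivalence with A's per-call group scan is proved.

-- ===== PORT A =====
def pvLevelMappings : List (String × List String) :=
  [("Entry-Level", ["Entry-Level", "Junior"]),
   ("Mid-Level", ["Mid-Level", "Mid-Senior", "Senior Individual Contributor"]),
   ("Senior", ["Senior", "Senior Individual Contributor", "Lead"]),
   ("Executive", ["Executive", "Director", "VP"])]

-- the 'for level, scopes in level_mappings.items(): if … return False' loop
def pvLoopA : List (String × List String) → String → String → Bool
  | [], _, _ => true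
  | (_, scopes) :: rest, e, s =>
    if scopes.contains e && scopes.contains s then false else pvLoopA rest e s

def is_role_level_inconsistent_py (exp_level : String) (seniority_scope : String) : Bool :=
  pvLoopA pvLevelMappings exp_level seniority_scope

-- ===== PORT B =====
-- the module-level loop: for scopes in values: for sc in scopes: _COMPAT.setdefault(sc, set()).update(scopes)
def pvCompat : PySem.Dict String (PySem.Set String) :=
  (pvLevelMappings.map Prod.snd).foldl
    (fun d scopes =>
      scopes.foldl
        (fun d' sc => d'.insert sc (PySem.Set.update (d'.getD sc PySem.Set.empty) scopes))
        d)
    PySem.Dict.empty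

def is_role_level_inconsistent_py_alt (exp_level : String) (seniority_scope : String) : Bool :=
  !(PySem.Set.contains (pvCompat.getD exp_level PySem.Set.empty) seniority_scope)

-- ===== PRECONDITION & SPEC =====
def Spec_is_role_level_inconsistent_py (exp_level : String) (seniority_scope : String) (out : Bool) : Prop := out = is_role_level_inconsistent_py_alt exp_level seniority_scope
instance (exp_level : String) (seniority_scope : String) (out : Bool) : Decidable (Spec_is_role_level_inconsistent_py exp_level seniority_scope out) := by unfold Spec_is_role_level_inconsistent_py; infer_instance

-- ===== CLAIM (what is proved, stated in full; the proofs are below) =====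
def Claim_equal_is_role_level_inconsistent_py : Prop := ∀ (exp_level : String) (seniority_scope : String), Dom_is_role_level_inconsistent_py exp_level seniority_scope → Spec_is_role_level_inconsistent_py exp_level seniority_scope (is_role_level_inconsistent_py exp_level seniority_scope)

-- ===== LEMMAS AND PROOFS =====

-- the ten scope names occurring anywhere in the fixed mapping
def pvAllScopes : List String :=
  ["Entry-Level", "Junior", "Mid-Level", "Mid-Senior", "Senior Individual Contributor",
   "Senior", "Lead", "Executive", "Director", "VP"]

-- if exp_level is none of the ten scope names, A's every group test fails
lemma pvLoopA_of_not_mem (e s : String) (he : e ∉ pvAllScopes) :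
    pvLoopA pvLevelMappings e s = true := by
  simp only [pvAllScopes, List.mem_cons, not_or] at he
  obtain ⟨h1, h2, h3, h4, h5, h6, h7, h8, h9, h10, -⟩ := he
  simp [pvLoopA, pvLevelMappings, h1, h2, h3, h4, h5, h6, h7, h8, h9, h10]

-- the adjacency dict B's module-level loop builds, as a literal
lemma pvCompat_eq : pvCompat = PySem.Dict.mk
    [("Entry-Level", ["Entry-Level", "Junior"]),
     ("Junior", ["Entry-Level", "Junior"]),
     ("Mid-Level", ["Mid-Level", "Mid-Senior", "Senior Individual Contributor"]),
     ("Mid-Senior", ["Mid-Level", "Mid-Senior", "Senior Individual Contributor"]),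
     ("Senior Individual Contributor",
      ["Mid-Level", "Mid-Senior", "Senior Individual Contributor", "Senior", "Lead"]),
     ("Senior", ["Senior", "Senior Individual Contributor", "Lead"]),
     ("Lead", ["Senior", "Senior Individual Contributor", "Lead"]),
     ("Executive", ["Executive", "Director", "VP"]),
     ("Director", ["Executive", "Director", "VP"]),
     ("VP", ["Executive", "Director", "VP"])] := by decide

-- if exp_level is none of the ten scope names, it is not a key of the adjacency dict
lemma pvAlt_of_not_mem (e s : String) (he : e ∉ pvAllScopes) :
    is_role_level_inconsistent_py_alt e s = true := by
  simp only [pvAllScopes, List.mem_cons, not_or] at he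
  obtain ⟨h1, h2, h3, h4, h5, h6, h7, h8, h9, h10, -⟩ := he
  simp [is_role_level_inconsistent_py_alt, pvCompat_eq, PySem.Dict.getD,
    PySem.Dict.get?_mk_cons, PySem.Dict.get?, Ne.symm h1, Ne.symm h2, Ne.symm h3, Ne.symm h4, Ne.symm h5,
    Ne.symm h6, Ne.symm h7, Ne.symm h8, Ne.symm h9, Ne.symm h10]

lemma pv_agree (e s : String) :
    pvLoopA pvLevelMappings e s = is_role_level_inconsistent_py_alt e s := by
  by_cases he : e ∈ pvAllScopes
  · by_cases hs : s ∈ pvAllScopes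
    · simp only [pvAllScopes, List.mem_cons, List.not_mem_nil, or_false] at he hs
      rcases he with rfl | rfl | rfl | rfl | rfl | rfl | rfl | rfl | rfl | rfl <;>
        rcases hs with rfl | rfl | rfl | rfl | rfl | rfl | rfl | rfl | rfl | rfl <;> decide
    · -- s matches no scope name: every group test containing s fails, and s is in no compat set
      simp only [pvAllScopes, List.mem_cons, not_or] at hs
      obtain ⟨h1, h2, h3, h4, h5, h6, h7, h8, h9, h10, -⟩ := hs
      simp only [pvAllScopes, List.mem_cons, List.not_mem_nil, or_false] at he
      rcases he with rfl | rfl | rfl | rfl | rfl | rfl | rfl | rfl | rfl | rfl <;>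
        simp [pvLoopA, pvLevelMappings, is_role_level_inconsistent_py_alt, pvCompat_eq,
          PySem.Dict.getD, PySem.Dict.get?_mk_cons, PySem.Set.contains,
          h1, h2, h3, h4, h5, h6, h7, h8, h9, h10]
  · rw [pvLoopA_of_not_mem e s he, pvAlt_of_not_mem e s he]

-- ===== VERDICT (by name: the statement is the Claim_ definition above) =====
theorem is_role_level_inconsistent_py_spec : Claim_equal_is_role_level_inconsistent_py := by
  intro e s _
  unfold Spec_is_role_level_inconsistent_py is_role_level_inconsistent_py
  exact pv_agree e s
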